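-- pv_equiv track=rewrite | github.com/AayushAnimalFriends/codingclass2-Journal | project euler/problem60.py | concatinate
-- ===== SOURCE A (Python) =====
-- def concatinate(fn, ln):#firstnumber and lastnumber
--     ln2 = ln #making sure I can add last number to first number at the end
--     i = 10 # creating my number i will use to divide ln
--     lnt = 0 #lastnumbertimes i will use to see how many times i will have to divide before i reach zero
--     if(ln2 == 0):#check for if lastnumber = 0 since lnt will have to equal the number of digets 0 is one diget
--         lnt = 1
--     while (ln != 0):# creating the check for when its done
--         ln = ln // i #doing the divide
--         lnt = lnt + 1# counting how many times i will divide
--     for counter in range(0,lnt):# checking how many times to multiply first number by 10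
--         fn = fn * i# multiplying fn by ten by how many digets are in ln
--     return fn + ln2# returning the concatinated number
-- ===== SOURCE B (Python) =====
-- def concatinate(fn, ln):
--     return fn * 10 ** len(str(ln)) + ln
-- ===== Notes on version B (the rewrite author's own statement) =====
-- stated objective: simpler
-- what changed: Replaces A's digit-counting while loop plus repeated-multiplication for loop by the closed-form one-liner fn * 10**len(str(ln)) + ln (len(str(ln)) gives 1 for ln==0, matching A's special case).
import Mathlib
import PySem

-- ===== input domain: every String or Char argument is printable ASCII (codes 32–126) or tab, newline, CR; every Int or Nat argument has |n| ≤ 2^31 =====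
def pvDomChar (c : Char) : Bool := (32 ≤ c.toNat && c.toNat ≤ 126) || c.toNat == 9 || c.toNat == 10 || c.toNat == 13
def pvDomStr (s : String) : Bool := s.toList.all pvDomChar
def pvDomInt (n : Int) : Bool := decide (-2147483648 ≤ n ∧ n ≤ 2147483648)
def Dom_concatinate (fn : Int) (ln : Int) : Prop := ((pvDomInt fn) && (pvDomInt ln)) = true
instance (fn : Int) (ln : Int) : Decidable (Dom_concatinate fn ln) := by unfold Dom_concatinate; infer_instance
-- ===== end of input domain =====

-- B replaces A's two loops (digit counting, repeated multiplication) by the closed form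
-- fn * 10 ^ len(str(ln)) + ln; objective: simpler.

-- ===== PORT A =====
-- A's `while ln != 0: ln = ln // 10; lnt += 1`, fuel-bounded only to make it total
-- (with fuel = ln.natAbs + 1 it is exact wherever the Python loop terminates, i.e. ln ≥ 0).
def concatinateWhile : Nat → Int → Int → Int × Int
  | 0, ln, lnt => (ln, lnt)
  | fuel + 1, ln, lnt =>
    if ln ≠ 0 then concatinateWhile fuel (PySem.Int.floordiv ln 10) (lnt + 1)
    else (ln, lnt)

def concatinate (fn : Int) (ln : Int) : Int :=
  let ln2 := ln
  let i : Int := 10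
  let lnt : Int := if ln2 = 0 then 1 else 0
  let r := concatinateWhile (ln.natAbs + 1) ln lnt
  let fn' := (PySem.List.pyRange 0 r.2 1).foldl (fun fn _ => fn * i) fn
  fn' + ln2

-- ===== PORT B =====
def concatinate_alt (fn : Int) (ln : Int) : Int :=
  fn * 10 ^ (PySem.Int.toChars ln).length + ln

-- ===== PRECONDITION & SPEC =====
-- Pre_ excludes negative ln, on which A's while loop never terminates (-1 // 10 == -1 in Python).
def Pre_concatinate (fn : Int) (ln : Int) : Prop := 0 ≤ ln
instance (fn : Int) (ln : Int) : Decidable (Pre_concatinate fn ln) := by unfold Pre_concatinate; infer_instance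
def pvWitness_concatinate : Int × Int := (37, 405)

def Spec_concatinate (fn : Int) (ln : Int) (out : Int) : Prop := out = concatinate_alt fn ln
instance (fn : Int) (ln : Int) (out : Int) : Decidable (Spec_concatinate fn ln out) := by unfold Spec_concatinate; infer_instance

-- ===== CLAIM (what is proved, stated in full; the proofs are below) =====
def Claim_equal_concatinate : Prop := ∀ (fn : Int) (ln : Int), Dom_concatinate fn ln → Pre_concatinate fn ln → Spec_concatinate fn ln (concatinate fn ln)

-- ===== LEMMAS AND PROOFS =====

-- the common digit count: d(n) = number of decimal digits of n (d 0 = 1)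
def dCount (n : Nat) : Nat :=
  if h : n < 10 then 1 else dCount (n / 10) + 1
decreasing_by exact Nat.div_lt_self (by omega) (by omega)

lemma dCount_ge (n : Nat) (h : ¬ n < 10) : dCount n = dCount (n / 10) + 1 := by
  conv_lhs => rw [dCount]
  rw [dif_neg h]

lemma dCount_lt (n : Nat) (h : n < 10) : dCount n = 1 := by
  conv_lhs => rw [dCount]
  rw [dif_pos h]

-- Nat.toDigitsCore length equals dCount (fuel-independent once fuel > n)
lemma toDigitsCore_len (f : Nat) : ∀ n : Nat, n < f →
    (Nat.toDigitsCore 10 f n []).length = dCount n := by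
  induction f with
  | zero => intro n h; omega
  | succ f ih =>
    intro n hn
    rw [Nat.toDigitsCore]
    by_cases h : n / 10 = 0
    · have : n < 10 := Nat.lt_of_div_eq_zero (by omega) h
      simp [h, dCount_lt n this]
    · have hge : 10 ≤ n := by
        by_contra hlt
        exact h (Nat.div_eq_of_lt (by omega))
      simp only [h, if_false]
      rw [Nat.toDigitsCore_lens_eq, ih (n / 10) (by omega)]
      rw [dCount_ge n (by omega)]

lemma toDigits_len (n : Nat) : (Nat.toDigits 10 n).length = dCount n := by
  unfold Nat.toDigits
  exact toDigitsCore_len (n + 1) n (Nat.lt_succ_self n)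

-- B's digit count = dCount for nonneg input
lemma toChars_len (ln : Int) (h : 0 ≤ ln) :
    (PySem.Int.toChars ln).length = dCount ln.toNat := by
  unfold PySem.Int.toChars
  rw [if_neg (by omega)]
  exact toDigits_len ln.toNat

-- A's while loop counts dCount n iterations for positive n (fuel > n)
lemma while_count (f : Nat) : ∀ (n : Nat) (lnt : Int), 0 < n → n < f →
    (concatinateWhile f (n : Int) lnt).2 = lnt + dCount n := by
  induction f with
  | zero => intro n lnt h hf; omega
  | succ f ih =>
    intro n lnt hpos hf
    rw [concatinateWhile]
    have hne : (n : Int) ≠ 0 := by exact_mod_cast Nat.pos_iff_ne_zero.mp hpos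
    rw [if_pos hne]
    have hd : PySem.Int.floordiv (n : Int) 10 = ((n / 10 : Nat) : Int) := by
      exact_mod_cast PySem.Int.floordiv_natCast n 10
    rw [hd]
    by_cases h : n < 10
    · have h0 : n / 10 = 0 := Nat.div_eq_of_lt h
      rw [h0]
      show (concatinateWhile f ((0 : Nat) : Int) (lnt + 1)).2 = lnt + dCount n
      rw [dCount_lt n h]
      cases f with
      | zero => omega
      | succ f => rw [concatinateWhile]; simp
    · rw [ih (n / 10) (lnt + 1) (by omega) (by omega), dCount_ge n h]
      push_cast; ring

-- A's repeated multiplication is multiplication by 10 ^ k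
lemma foldl_mul_ten (k : Nat) (fn : Int) :
    (PySem.List.pyRange 0 (k : Int) 1).foldl (fun fn _ => fn * 10) fn = fn * 10 ^ k := by
  rw [PySem.List.pyRange_zero_natCast]
  induction k generalizing fn with
  | zero => simp
  | succ k ih =>
    rw [List.range_succ, List.map_append, List.foldl_append, ih]
    simp [pow_succ]; ring

-- final count of A's lnt, all cases
lemma concatinate_lnt (ln : Int) (h : 0 ≤ ln) :
    (concatinateWhile (ln.natAbs + 1) ln (if ln = 0 then 1 else 0)).2 = (dCount ln.toNat : Int) := by
  by_cases h0 : ln = 0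
  · subst h0; rw [if_pos rfl]
    show (concatinateWhile 1 0 1).2 = ((dCount 0 : Nat) : Int)
    rw [concatinateWhile]; simp [dCount_lt 0 (by omega)]
  · rw [if_neg h0]
    obtain ⟨n, rfl⟩ : ∃ n : Nat, ln = (n : Int) := ⟨ln.toNat, by omega⟩
    simp only [Int.natAbs_natCast, Int.toNat_natCast]
    have := while_count (n + 1) n 0 (by omega) (by omega)
    rw [this]; ring

theorem concatinate_eq (fn ln : Int) (h : 0 ≤ ln) :
    concatinate fn ln = concatinate_alt fn ln := by
  unfold concatinate concatinate_alt
  simp only []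
  rw [concatinate_lnt ln h, foldl_mul_ten (dCount ln.toNat) fn, toChars_len ln h]

-- ===== VERDICT (by name: the statement is the Claim_ definition above) =====
theorem concatinate_spec : Claim_equal_concatinate := by
  intro fn ln _ hpre
  exact concatinate_eq fn ln hpre
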